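-- pv_equiv track=rewrite | github.com/stobinaator/Advent-of-Code | 2017/day 3 spiral memory/joel_way.py | first_value_larger_than
-- ===== SOURCE A (Python) =====
-- from collections import defaultdict
-- import math
-- from typing import Tuple, Dict, Iterator
-- import itertools
--
-- def find_odd_squareroot(x: int) -> int:
--     """
--     Find the odd number n such that
--     n ** 2 <= x <= (n+2) ** 2
--     """
--     # largest integer m with m**2 <= x
--     sqrt_x = int(math.sqrt(x))
--     if sqrt_x % 2 == 0:
--         return sqrt_x - 1
--     else:
--         return sqrt_x
--
-- def find_coordinates(num: int)-> Tuple[int, int]: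
--     sqrt = find_odd_squareroot(num)
--     x = y = sqrt // 2
--
--     square = sqrt ** 2
--
--     if num == square:
--         return (x,y)
--
--     side_length = sqrt + 1
--     # right side
--     if num <= square + side_length:
--         excess = num - square
--         return (x + 1, y + 1 - excess)
--     # top side
--     elif num <= square + 2 * side_length:
--         excess = num - square - side_length
--         return (x + 1 - excess, y + 1 - side_length)
--     # left side
--     elif num <= square + 3 * side_length:
--         excess = num - square - 2 * side_length
--         return (-x - 1 , -y - 1 + excess)
--     # bottom side
--     else:
--         excess = num - square - 3 * side_length
--         return (-x - 1 + excess, y + 1)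
--
-- def get_neighbors(loc: Tuple[int, int]) -> Iterator[Tuple[int, int]]:
--     x, y = loc
--     yield x + 1, y
--     yield x + 1, y - 1
--     yield x, y - 1
--     yield x - 1, y - 1
--     yield x - 1, y
--     yield x - 1, y + 1
--     yield x, y + 1
--     yield x + 1, y + 1
--
-- def first_value_larger_than(num: int) -> int:
--     grid: Dict[Tuple[int,int], int] = defaultdict(int)
--
--     grid[(0,0)] = 1
--
--     for i in itertools.count(2):
--         loc = find_coordinates(i)
--
--         value = sum(grid[neighbor]
--                     for neighbor in get_neighbors(loc))
--         if value > num: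
--             return value
--         grid[loc] = value
-- ===== SOURCE B (Python) =====
-- def first_value_larger_than(num: int) -> int:
--     # Walk the spiral directly: position + direction vectors, step lengths
--     # 1,1,2,2,3,3,... (turn after each run, lengthen after every second run).
--     grid = {(0, 0): 1}
--     x = y = 0
--     dirs = [(1, 0), (0, -1), (-1, 0), (0, 1)]
--     d = 0
--     steps = 1
--     while True:
--         for _ in range(2):
--             dx, dy = dirs[d]
--             for _ in range(steps):
--                 x += dx
--                 y += dy
--                 value = sum(grid.get((x + i, y + j), 0)
--                             for i in (-1, 0, 1) for j in (-1, 0, 1)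
--                             if (i, j) != (0, 0))
--                 if value > num:
--                     return value
--                 grid[(x, y)] = value
--             d = (d + 1) % 4
--         steps += 1
-- ===== Notes on version B (the rewrite author's own statement) =====
-- stated objective: alternative
-- what changed: B walks the spiral incrementally with direction vectors and the 1,1,2,2,3,3,... step schedule instead of recomputing each cell's coordinates from a closed form with math.sqrt.
import Mathlib
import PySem

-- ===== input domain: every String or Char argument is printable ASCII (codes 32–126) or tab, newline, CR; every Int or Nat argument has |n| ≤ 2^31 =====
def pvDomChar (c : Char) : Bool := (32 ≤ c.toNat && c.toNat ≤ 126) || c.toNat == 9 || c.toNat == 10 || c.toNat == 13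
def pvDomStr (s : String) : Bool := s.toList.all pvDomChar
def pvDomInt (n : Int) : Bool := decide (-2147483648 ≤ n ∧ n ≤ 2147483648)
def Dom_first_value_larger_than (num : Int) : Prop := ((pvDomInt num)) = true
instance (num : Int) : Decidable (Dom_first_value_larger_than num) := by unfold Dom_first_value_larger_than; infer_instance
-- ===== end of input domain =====

-- B replaces A's closed-form (sqrt-based) coordinate computation by a direct incremental
-- spiral walk with direction vectors and the 1,1,2,2,3,3,... step schedule (alternative
-- decomposition, not claimed faster).
--
-- Both Python loops are unbounded ('while True' / itertools.count); on the stated domain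
-- |num| ≤ 2^31 they return within 145 cells (the 145th value is 3813299996 > 2^31), so the
-- ports carry a fuel guard that is provably never reached on Dom.

-- ===== PORT A =====
-- int(math.sqrt(x)) for the small nonnegative x this program reaches: largest m with m*m ≤ n
-- (kernel-transparent, unlike Nat.sqrt)
def pvIsqrt (n : Nat) : Nat :=
  (List.range (n + 1)).foldl (fun acc m => if m * m ≤ n then m else acc) 0

def find_odd_squareroot (x : Int) : Int :=
  let sqrt_x : Int := (pvIsqrt x.toNat : Int)
  if PySem.Int.mod sqrt_x 2 = 0 then sqrt_x - 1 else sqrt_x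

def find_coordinates (num : Int) : Int × Int :=
  let sqrt := find_odd_squareroot num
  let x := PySem.Int.floordiv sqrt 2
  let y := x
  let square := sqrt ^ 2
  if num = square then (x, y)
  else
    let side_length := sqrt + 1
    if num ≤ square + side_length then
      let excess := num - square
      (x + 1, y + 1 - excess)
    else if num ≤ square + 2 * side_length then
      let excess := num - square - side_length
      (x + 1 - excess, y + 1 - side_length)
    else if num ≤ square + 3 * side_length then
      let excess := num - square - 2 * side_length
      (-x - 1, -y - 1 + excess)
    else
      let excess := num - square - 3 * side_length
      (-x - 1 + excess, y + 1)

def get_neighbors (loc : Int × Int) : List (Int × Int) :=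
  [(loc.1 + 1, loc.2), (loc.1 + 1, loc.2 - 1), (loc.1, loc.2 - 1), (loc.1 - 1, loc.2 - 1),
   (loc.1 - 1, loc.2), (loc.1 - 1, loc.2 + 1), (loc.1, loc.2 + 1), (loc.1 + 1, loc.2 + 1)]

def fvl_loop (num : Int) (grid : PySem.Dict (Int × Int) Int) (i : Nat) : Nat → Int
  | 0 => 0  -- fuel guard only; never reached on Dom (proved below)
  | fuel + 1 =>
    let loc := find_coordinates (i : Int)
    -- defaultdict(int): a missing neighbor reads as 0; the 0-entries the Python defaultdict
    -- silently stores on read are unobservable (every read defaults to 0), so getD is exact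
    let value := ((get_neighbors loc).map (fun n => grid.getD n 0)).sum
    if value > num then value else fvl_loop num (grid.insert loc value) (i + 1) fuel

def first_value_larger_than (num : Int) : Int :=
  fvl_loop num ((PySem.Dict.empty).insert (0, 0) 1) 2 150

-- ===== PORT B =====
def pvDirs : List (Int × Int) := [(1, 0), (0, -1), (-1, 0), (0, 1)]

def nbr_sum (grid : PySem.Dict (Int × Int) Int) (x y : Int) : Int :=
  -- sum(grid.get((x+i, y+j), 0) for i in (-1,0,1) for j in (-1,0,1) if (i,j) != (0,0))
  (([-1, 0, 1] : List Int).flatMap (fun i =>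
    ([-1, 0, 1] : List Int).filterMap (fun j =>
      if i = 0 ∧ j = 0 then none else some (grid.getD (x + i, y + j) 0)))).sum

def run_steps (num : Int) (grid : PySem.Dict (Int × Int) Int) (x y dx dy : Int) :
    Nat → (Int ⊕ (Int × Int × PySem.Dict (Int × Int) Int))
  | 0 => Sum.inr (x, y, grid)
  | n + 1 =>
    let x' := x + dx
    let y' := y + dy
    let value := nbr_sum grid x' y'
    if value > num then Sum.inl value
    else run_steps num (grid.insert (x', y') value) x' y' dx dy n

def run_legs (num : Int) (grid : PySem.Dict (Int × Int) Int) (x y : Int) (d steps : Nat) :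
    Nat → (Int ⊕ (Int × Int × Nat × PySem.Dict (Int × Int) Int))
  | 0 => Sum.inr (x, y, d, grid)
  | r + 1 =>
    let dxy := pvDirs.getD d (0, 0)  -- dirs[d]; d < 4 always (maintained via % 4)
    match run_steps num grid x y dxy.1 dxy.2 steps with
    | Sum.inl v => Sum.inl v
    | Sum.inr (x', y', grid') => run_legs num grid' x' y' ((d + 1) % 4) steps r

def spiral_loop (num : Int) (grid : PySem.Dict (Int × Int) Int) (x y : Int) (d steps : Nat) :
    Nat → Int
  | 0 => 0  -- fuel guard only; never reached on Dom (proved below)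
  | fuel + 1 =>
    match run_legs num grid x y d steps 2 with
    | Sum.inl v => v
    | Sum.inr (x', y', d', grid') => spiral_loop num grid' x' y' d' (steps + 1) fuel

def first_value_larger_than_alt (num : Int) : Int :=
  spiral_loop num ((PySem.Dict.empty).insert (0, 0) 1) 0 0 0 1 12

-- ===== PRECONDITION & SPEC =====
def Spec_first_value_larger_than (num : Int) (out : Int) : Prop := out = first_value_larger_than_alt num
instance (num : Int) (out : Int) : Decidable (Spec_first_value_larger_than num out) := by unfold Spec_first_value_larger_than; infer_instance

-- ===== CLAIM (what is proved, stated in full; the proofs are below) =====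
def Claim_equal_first_value_larger_than : Prop := ∀ (num : Int), Dom_first_value_larger_than num → Spec_first_value_larger_than num (first_value_larger_than num)

-- ===== LEMMAS AND PROOFS =====

-- the neighbor sum both loops compute at a cell (A's phrasing)
def sumN (grid : PySem.Dict (Int × Int) Int) (p : Int × Int) : Int :=
  ((get_neighbors p).map (fun n => grid.getD n 0)).sum

-- generic early-return scan over a list of cell positions
def scanSt (num : Int) : PySem.Dict (Int × Int) Int → List (Int × Int) →
    (Int ⊕ PySem.Dict (Int × Int) Int)
  | grid, [] => Sum.inr grid
  | grid, p :: r =>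
    let v := sumN grid p
    if v > num then Sum.inl v else scanSt num (grid.insert p v) r

-- the value sequence along a position list (independent of num)
def valsFrom : PySem.Dict (Int × Int) Int → List (Int × Int) → List Int
  | _, [] => []
  | grid, p :: r => let v := sumN grid p; v :: valsFrom (grid.insert p v) r

-- A's positions: find_coordinates i for i = i0, i0+1, ...
def posA (i : Nat) : Nat → List (Int × Int)
  | 0 => []
  | f + 1 => find_coordinates (i : Int) :: posA (i + 1) f

-- B's positions: one straight leg, two legs, the whole walk
def segPos (x y dx dy : Int) : Nat → List (Int × Int)
  | 0 => []
  | n + 1 => (x + dx, y + dy) :: segPos (x + dx) (y + dy) dx dy n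

def legsPos (x y : Int) (d steps : Nat) : Nat → (List (Int × Int)) × Int × Int × Nat
  | 0 => ([], x, y, d)
  | r + 1 =>
    let dxy := pvDirs.getD d (0, 0)
    let rest := legsPos (x + dxy.1 * steps) (y + dxy.2 * steps) ((d + 1) % 4) steps r
    (segPos x y dxy.1 dxy.2 steps ++ rest.1, rest.2)

def walkPos (x y : Int) (d steps : Nat) : Nat → List (Int × Int)
  | 0 => []
  | f + 1 =>
    let lg := legsPos x y d steps 2
    lg.1 ++ walkPos lg.2.1 lg.2.2.1 lg.2.2.2 (steps + 1) f

lemma nbr_sum_eq_sumN (grid : PySem.Dict (Int × Int) Int) (x y : Int) :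
    nbr_sum grid x y = sumN grid (x, y) := by
  have h1 : x + (-1 : Int) = x - 1 := by ring
  have h2 : y + (-1 : Int) = y - 1 := by ring
  have h3 : x + (0 : Int) = x := by ring
  have h4 : y + (0 : Int) = y := by ring
  simp [nbr_sum, sumN, get_neighbors, List.flatMap, h1, h2, h3, h4]
  ring

lemma scanSt_append (num : Int) (l2 : List (Int × Int)) :
    ∀ (l1 : List (Int × Int)) (grid : PySem.Dict (Int × Int) Int),
      scanSt num grid (l1 ++ l2) =
        match scanSt num grid l1 with
        | Sum.inl v => Sum.inl v
        | Sum.inr g => scanSt num g l2 := by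
  intro l1
  induction l1 with
  | nil => intro grid; simp [scanSt]
  | cons p r ih =>
    intro grid
    simp only [List.cons_append, scanSt]
    split_ifs with h
    · rfl
    · exact ih _

lemma fvl_loop_eq (num : Int) :
    ∀ (fuel i : Nat) (grid : PySem.Dict (Int × Int) Int),
      fvl_loop num grid i fuel =
        (match scanSt num grid (posA i fuel) with
         | Sum.inl v => v
         | Sum.inr _ => 0) := by
  intro fuel
  induction fuel with
  | zero => intro i grid; simp [fvl_loop, posA, scanSt]
  | succ f ih =>
    intro i grid
    simp only [fvl_loop, posA, scanSt, sumN]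
    split_ifs with h
    · rfl
    · exact ih _ _

lemma run_steps_eq (num dx dy : Int) :
    ∀ (n : Nat) (x y : Int) (grid : PySem.Dict (Int × Int) Int),
      run_steps num grid x y dx dy n =
        (match scanSt num grid (segPos x y dx dy n) with
         | Sum.inl v => Sum.inl v
         | Sum.inr g => Sum.inr (x + dx * n, y + dy * n, g)) := by
  intro n
  induction n with
  | zero => intro x y grid; simp [run_steps, segPos, scanSt]
  | succ m ih =>
    intro x y grid
    simp only [run_steps, segPos, scanSt, nbr_sum_eq_sumN]
    split_ifs with h
    · rfl
    · rw [ih]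
      have hx : x + dx + dx * (m : Int) = x + dx * ((m : Nat) + 1 : Nat) := by push_cast; ring
      have hy : y + dy + dy * (m : Int) = y + dy * ((m : Nat) + 1 : Nat) := by push_cast; ring
      rw [hx, hy]

lemma run_legs_eq (num : Int) (steps : Nat) :
    ∀ (r : Nat) (x y : Int) (d : Nat) (grid : PySem.Dict (Int × Int) Int),
      run_legs num grid x y d steps r =
        (match scanSt num grid ((legsPos x y d steps r).1) with
         | Sum.inl v => Sum.inl v
         | Sum.inr g => Sum.inr ((legsPos x y d steps r).2.1,
             (legsPos x y d steps r).2.2.1, (legsPos x y d steps r).2.2.2, g)) := by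
  intro r
  induction r with
  | zero => intro x y d grid; simp [run_legs, legsPos, scanSt]
  | succ m ih =>
    intro x y d grid
    simp only [run_legs, legsPos, run_steps_eq, scanSt_append]
    cases hs : scanSt num grid (segPos x y (pvDirs.getD d (0, 0)).1 (pvDirs.getD d (0, 0)).2 steps) with
    | inl v => rfl
    | inr g => simpa using ih _ _ _ g

lemma spiral_loop_eq (num : Int) :
    ∀ (fuel : Nat) (x y : Int) (d steps : Nat) (grid : PySem.Dict (Int × Int) Int),
      spiral_loop num grid x y d steps fuel =
        (match scanSt num grid (walkPos x y d steps fuel) with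
         | Sum.inl v => v
         | Sum.inr _ => 0) := by
  intro fuel
  induction fuel with
  | zero => intro x y d steps grid; simp [spiral_loop, walkPos, scanSt]
  | succ f ih =>
    intro x y d steps grid
    simp only [spiral_loop, walkPos, run_legs_eq, scanSt_append]
    cases hs : scanSt num grid ((legsPos x y d steps 2).1) with
    | inl v => rfl
    | inr g => simpa using ih _ _ _ _ g

-- if some value along pre already exceeds num, the scan never looks past pre
lemma scanSt_stable (num : Int) :
    ∀ (pre : List (Int × Int)) (grid : PySem.Dict (Int × Int) Int),
      (∃ v ∈ valsFrom grid pre, num < v) →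
      ∀ (t1 t2 : List (Int × Int)),
        scanSt num grid (pre ++ t1) = scanSt num grid (pre ++ t2) := by
  intro pre
  induction pre with
  | nil => intro grid h; simp [valsFrom] at h
  | cons p r ih =>
    intro grid h t1 t2
    simp only [List.cons_append, scanSt]
    split_ifs with hv
    · rfl
    · apply ih
      simp only [valsFrom, List.mem_cons] at h
      obtain ⟨v, hv', hlt⟩ := h
      rcases hv' with rfl | hv'
      · omega
      · exact ⟨v, hv', hlt⟩

-- ===== VERDICT (by name: the statement is the Claim_ definition above) =====
set_option maxRecDepth 100000 in
set_option maxHeartbeats 2000000 in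
theorem first_value_larger_than_spec : Claim_equal_first_value_larger_than := by
  intro num hdom
  unfold Spec_first_value_larger_than
  have hnum : num ≤ 2147483648 := by
    simp [Dom_first_value_larger_than, pvDomInt] at hdom; omega
  have hA := fvl_loop_eq num 150 2 ((PySem.Dict.empty).insert (0, 0) 1)
  have hB := spiral_loop_eq num 12 0 0 0 1 ((PySem.Dict.empty).insert (0, 0) 1)
  -- B's walk visits the same cells as A's closed-form enumeration, and then some more
  have hpre : walkPos 0 0 0 1 12 = posA 2 150 ++ (walkPos 0 0 0 1 12).drop 150 := by
    have ht : (walkPos 0 0 0 1 12).take 150 = posA 2 150 := by decide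
    rw [← ht]; exact (List.take_append_drop 150 _).symm
  -- the 145th value already exceeds every num in Dom
  have hex : ∃ v ∈ valsFrom ((PySem.Dict.empty).insert (0, 0) 1) (posA 2 150), num < v := by
    refine ⟨3813299996, ?_, by omega⟩
    decide
  have hstab := scanSt_stable num (posA 2 150) ((PySem.Dict.empty).insert (0, 0) 1) hex
    [] ((walkPos 0 0 0 1 12).drop 150)
  rw [first_value_larger_than, first_value_larger_than_alt, hA, hB, hpre, ← hstab,
    List.append_nil]
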